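-- pv_equiv track=rewrite | github.com/IanCodes1/Python_Projects | Fundamentals_of_Programming/WordleAssistant/WordleAssistant.py | containsNone
-- ===== SOURCE A (Python) =====
-- def containsNone(wordlist, exclude):
--     """ Given your wordlist, return a set of all words from the wordlist
--     that do not contain any of the letters in the string exclude.
--     """
--     endResult = set()
--     nExclude = set(exclude)
--
--     for w in wordlist:
--         count = 0
--         for c in nExclude:
--             if c not in w:
--                 count += 1
--         if count == len(nExclude):
--             endResult.add(w)
--     return endResult
-- ===== SOURCE B (Python) =====
-- def containsNone(wordlist, exclude):
--     """Progressive filtering: start from set(wordlist) and, for each excluded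
--     letter, drop every word that contains it."""
--     result = set(wordlist)
--     for c in exclude:
--         result = {w for w in result if c not in w}
--     return result
-- ===== Notes on version B (the rewrite author's own statement) =====
-- stated objective: alternative
-- what changed: Loop nesting is reversed: instead of one pass over words with an inner count over the excluded-letter set, B starts from set(wordlist) and repeatedly filters the shrinking word set once per excluded letter.
import Mathlib
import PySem

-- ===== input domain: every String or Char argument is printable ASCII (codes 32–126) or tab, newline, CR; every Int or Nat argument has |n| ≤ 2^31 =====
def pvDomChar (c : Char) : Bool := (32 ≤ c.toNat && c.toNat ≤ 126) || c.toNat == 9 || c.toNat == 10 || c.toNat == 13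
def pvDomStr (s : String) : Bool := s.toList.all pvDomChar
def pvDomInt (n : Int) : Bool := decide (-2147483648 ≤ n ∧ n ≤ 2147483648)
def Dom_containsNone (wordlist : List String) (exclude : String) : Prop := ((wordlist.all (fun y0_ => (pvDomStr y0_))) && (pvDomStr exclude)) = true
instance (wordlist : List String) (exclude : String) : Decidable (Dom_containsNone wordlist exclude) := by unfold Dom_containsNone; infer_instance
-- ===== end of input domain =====

-- B reverses the loop nesting (outer loop over excluded letters, repeated filtering of a shrinking word set); same set, same cost.

-- ===== PORT A =====
-- one word-pass; inner loop counts excluded letters absent from w, keep w iff all are absent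
def containsNone (wordlist : List String) (exclude : String) : List String :=
  let nExclude : PySem.Set Char := PySem.Set.ofList exclude.toList
  wordlist.foldl
    (fun endResult w =>
      let count : Nat :=
        nExclude.foldl (fun count c => if ¬ (w.toList.contains c) then count + 1 else count) 0
      if count = nExclude.length then PySem.Set.add endResult w else endResult)
    PySem.Set.empty

-- ===== PORT B =====
-- result = set(wordlist); for c in exclude: result = {w for w in result if c not in w}
def containsNone_alt (wordlist : List String) (exclude : String) : List String :=
  exclude.toList.foldl
    (fun result c => result.filter (fun w => !(w.toList.contains c)))
    (PySem.Set.ofList wordlist)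

-- ===== PRECONDITION & SPEC =====
def Spec_containsNone (wordlist : List String) (exclude : String) (out : List String) : Prop := out = containsNone_alt wordlist exclude
instance (wordlist : List String) (exclude : String) (out : List String) : Decidable (Spec_containsNone wordlist exclude out) := by unfold Spec_containsNone; infer_instance

-- ===== CLAIM (what is proved, stated in full; the proofs are below) =====
def Claim_equal_containsNone : Prop := ∀ (wordlist : List String) (exclude : String), Dom_containsNone wordlist exclude → Spec_containsNone wordlist exclude (containsNone wordlist exclude)

-- ===== LEMMAS AND PROOFS =====

-- A's inner counting loop is countP
theorem pvFoldlCount (w : String) (E : List Char) (n : Nat) :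
    E.foldl (fun count c => if ¬ (w.toList.contains c) then count + 1 else count) n
      = n + E.countP (fun c => !(w.toList.contains c)) := by
  induction E generalizing n with
  | nil => simp
  | cons c E ih =>
    rw [List.foldl_cons, ih, List.countP_cons]
    cases h : w.toList.contains c <;> simp <;> omega

-- A's keep-condition is "every excluded letter is absent from w"
theorem pvCondIff (w exclude : String) :
    ((PySem.Set.ofList exclude.toList).foldl
        (fun count c => if ¬ (w.toList.contains c) then count + 1 else count) 0
      = (PySem.Set.ofList exclude.toList).length)
    ↔ exclude.toList.all (fun c => !(w.toList.contains c)) = true := by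
  rw [pvFoldlCount, Nat.zero_add, List.countP_eq_length, List.all_eq_true]
  constructor
  · intro h c hc
    exact h c (by simpa [PySem.Set.mem_ofList] using hc)
  · intro h c hc
    exact h c (by simpa [PySem.Set.mem_ofList] using hc)

theorem pvFilterAdd (q : String → Bool) (s : PySem.Set String) (w : String) :
    (PySem.Set.add s w).filter q = if q w then PySem.Set.add (s.filter q) w else s.filter q := by
  rw [PySem.Set.add_eq_ite]
  by_cases hm : w ∈ s
  · rw [if_pos hm]
    cases hq : q w
    · simp [hq]
    · simp only [hq, if_true]
      rw [PySem.Set.add_of_mem (List.mem_filter.2 ⟨hm, hq⟩)]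
  · rw [if_neg hm, List.filter_append]
    cases hq : q w
    · simp [hq]
    · simp only [hq, if_true, List.filter_cons, List.filter_nil]
      rw [PySem.Set.add_of_not_mem (fun hc => hm (List.mem_filter.1 hc).1)]

theorem pvFoldA (q : String → Bool) (ws : List String) (s : List String) :
    ws.foldl (fun a w => if q w then PySem.Set.add a w else a) (s.filter q)
      = (ws.foldl PySem.Set.add s).filter q := by
  induction ws generalizing s with
  | nil => rfl
  | cons w ws ih =>
    simp only [List.foldl]
    rw [← pvFilterAdd, ih]

theorem pvFoldB (L : List Char) (S : List String) :
    L.foldl (fun r c => r.filter (fun w => !(w.toList.contains c))) S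
      = S.filter (fun w => L.all (fun c => !(w.toList.contains c))) := by
  induction L generalizing S with
  | nil => simp
  | cons c L ih =>
    simp only [List.foldl]
    rw [ih, List.filter_filter]
    apply List.filter_congr
    intro w _
    simp [List.all_cons, Bool.and_comm]

-- ===== VERDICT (by name: the statement is the Claim_ definition above) =====
theorem containsNone_spec : Claim_equal_containsNone := by
  intro wordlist exclude _
  unfold Spec_containsNone containsNone containsNone_alt
  rw [pvFoldB]
  have hfun :
      (fun (endResult : PySem.Set String) (w : String) =>
          if (PySem.Set.ofList exclude.toList).foldl
                (fun count c => if ¬ (w.toList.contains c) then count + 1 else count) 0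
              = (PySem.Set.ofList exclude.toList).length
          then PySem.Set.add endResult w else endResult)
        = fun a w => if exclude.toList.all (fun c => !(w.toList.contains c)) = true
                     then PySem.Set.add a w else a := by
    funext a w
    exact if_congr (pvCondIff w exclude) rfl rfl
  simp only [hfun]
  have h0 : (PySem.Set.empty : List String)
      = List.filter (fun w => exclude.toList.all (fun c => !(w.toList.contains c))) [] := rfl
  rw [h0]
  have := pvFoldA (fun w => exclude.toList.all (fun c => !(w.toList.contains c))) wordlist []
  rw [this]
  rfl
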